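-- pv_equiv track=rewrite | github.com/miliar/Code_Jam_Webscraper | solutions_python/Problem_123/571.py | solve
-- ===== SOURCE A (Python) =====
-- def solve(A, motes):
--     actions = 0
--     while len(motes) > 0:
--         if motes[0] < A:
--             A = A + motes[0]
--             motes = motes[1:]
--         else:
--             if A > 1:
--                 return actions + min(solve(A, list([A - 1] + motes)),
--                     solve(A, list(motes[1:]))) + 1
--             else:
--                 return actions + solve(A, list(motes[1:])) + 1
--     return actions
-- ===== SOURCE B (Python) =====
-- def _upd(d, k, v):
--     w = d.get(k)
--     if w is None:
--         d[k] = v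
--     else:
--         d[k] = min(w, v)
--
--
-- def solve(A, motes):
--     # Forward DP over the mote list: a frontier maps each reachable mote size
--     # to the fewest actions spent reaching it; equal sizes are merged.
--     frontier = {A: 0}
--     for m in motes:
--         nxt = {}
--         for x, c in frontier.items():
--             if m < x:
--                 _upd(nxt, x + m, c)
--             elif x <= 1:
--                 _upd(nxt, x, c + 1)
--             else:
--                 d = 1
--                 while m >= x:
--                     _upd(nxt, x, c + d)
--                     x = 2 * x - 1
--                     d += 1
--                 _upd(nxt, x + m, c + d - 1)
--         frontier = nxt
--     return min(frontier.values())
-- ===== Notes on version B (the rewrite author's own statement) =====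
-- stated objective: alternative
-- what changed: Replaces A's naive branching recursion (which re-explores identical (size, position) states and copies list slices) with an iterative one-pass forward dynamic program keeping a dictionary frontier of reachable mote sizes with their minimal action counts, merging equal sizes.
import Mathlib
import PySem

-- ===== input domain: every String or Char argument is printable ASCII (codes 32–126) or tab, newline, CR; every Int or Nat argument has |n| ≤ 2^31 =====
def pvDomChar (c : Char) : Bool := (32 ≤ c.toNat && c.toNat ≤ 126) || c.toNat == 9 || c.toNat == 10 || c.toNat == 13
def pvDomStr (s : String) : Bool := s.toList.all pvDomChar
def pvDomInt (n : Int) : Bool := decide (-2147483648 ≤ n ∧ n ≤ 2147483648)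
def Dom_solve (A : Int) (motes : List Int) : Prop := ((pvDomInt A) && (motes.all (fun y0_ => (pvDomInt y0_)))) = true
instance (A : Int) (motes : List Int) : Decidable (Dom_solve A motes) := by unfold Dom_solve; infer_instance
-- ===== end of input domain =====

-- B replaces A's branching recursion by a one-pass dynamic program over a frontier
-- dictionary (mote size -> fewest actions reaching it), merging equal sizes.


-- ===== PORT A =====
-- Termination helpers for the port of A (A's recursion grows the list by one in the
-- "add an (A-1) mote" branch, so a lexicographic potential measure is needed).

-- number of doubling steps (a -> 2a-1) until a exceeds m (0 if already, or if a ≤ 1)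
def growSteps (a m : Int) : Nat :=
  if a ≤ 1 ∨ m < a then 0 else 1 + growSteps (2*a - 1) m
termination_by (m + 1 - a).toNat
decreasing_by omega

-- absorb the absorbable prefix (the port-A while loop's absorbing phase)
def absorbPre (a : Int) (l : List Int) : Int × List Int :=
  match l with
  | [] => (a, [])
  | m :: t => if m < a then absorbPre (a + m) t else (a, m :: t)

def potE (x : Int) : Nat := 1 + growSteps 2 x
def listPot (l : List Int) : Nat := (l.map potE).sum
def phiA (a : Int) (l : List Int) : Nat := listPot (absorbPre a l).2
def epsA (a : Int) (l : List Int) : Nat :=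
  match (absorbPre a l).2 with
  | [] => 0
  | m :: _ => growSteps (absorbPre a l).1 m

theorem listPot_absorbPre_le (a : Int) (l : List Int) : listPot (absorbPre a l).2 ≤ listPot l := by
  induction l generalizing a with
  | nil => simp [absorbPre]
  | cons m t ih =>
    simp only [absorbPre]
    split
    · exact le_trans (ih (a + m)) (by simp [listPot])
    · simp

theorem absorbPre_absorb {a m : Int} {t : List Int} (h : m < a) :
    absorbPre a (m :: t) = absorbPre (a + m) t := by simp [absorbPre, h]

theorem absorbPre_stop {a m : Int} {t : List Int} (h : ¬ m < a) :
    absorbPre a (m :: t) = (a, m :: t) := by simp [absorbPre, h]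

-- decrease of the measure for the "add an (A-1) mote" call
theorem measure_add_dec {A m : Int} {t : List Int} (h1 : ¬ m < A) (h2 : 1 < A) :
    Prod.Lex (· < ·) (Prod.Lex (· < ·) (· < ·))
      (phiA A ((A-1) :: m :: t), epsA A ((A-1) :: m :: t), ((A-1) :: m :: t).length)
      (phiA A (m :: t), epsA A (m :: t), (m :: t).length) := by
  have habs : absorbPre A ((A-1) :: m :: t) = absorbPre (2*A - 1) (m :: t) := by
    have : (A:Int) - 1 < A := by omega
    rw [absorbPre_absorb this]; ring_nf
  by_cases hm : m < 2*A - 1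
  · apply Prod.Lex.left
    unfold phiA
    rw [habs, absorbPre_absorb hm, absorbPre_stop h1]
    calc listPot (absorbPre (2*A - 1 + m) t).2 ≤ listPot t := listPot_absorbPre_le _ _
      _ < listPot (m :: t) := by simp [listPot, potE]
  · have h2' : absorbPre (2*A - 1) (m :: t) = (2*A - 1, m :: t) := absorbPre_stop hm
    have hphi : phiA A ((A-1) :: m :: t) = phiA A (m :: t) := by
      unfold phiA; rw [habs, h2', absorbPre_stop h1]
    rw [hphi]
    apply Prod.Lex.right
    apply Prod.Lex.left
    unfold epsA
    rw [habs, h2', absorbPre_stop h1]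
    simp only
    have : growSteps A m = 1 + growSteps (2*A - 1) m := by
      rw [growSteps]; simp [h1]; omega
    omega

-- decrease for the "delete the blocker" call
theorem measure_del_dec {A m : Int} {t : List Int} (h1 : ¬ m < A) :
    Prod.Lex (· < ·) (Prod.Lex (· < ·) (· < ·))
      (phiA A t, epsA A t, t.length)
      (phiA A (m :: t), epsA A (m :: t), (m :: t).length) := by
  apply Prod.Lex.left
  unfold phiA
  rw [absorbPre_stop h1]
  calc listPot (absorbPre A t).2 ≤ listPot t := listPot_absorbPre_le _ _
    _ < listPot (m :: t) := by simp [listPot, potE]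

-- decrease for the absorb step
theorem measure_abs_dec {A m : Int} {t : List Int} (h : m < A) :
    Prod.Lex (· < ·) (Prod.Lex (· < ·) (· < ·))
      (phiA (A + m) t, epsA (A + m) t, t.length)
      (phiA A (m :: t), epsA A (m :: t), (m :: t).length) := by
  have hphi : phiA A (m :: t) = phiA (A + m) t := by unfold phiA; rw [absorbPre_absorb h]
  have heps : epsA A (m :: t) = epsA (A + m) t := by unfold epsA; rw [absorbPre_absorb h]
  rw [hphi, heps]
  apply Prod.Lex.right; apply Prod.Lex.right; simp

-- literal port of A: while-loop = structural recursion; at a blocker, branch on A > 1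
def solve (A : Int) (motes : List Int) : Int :=
  match motes with
  | [] => 0
  | m :: t =>
    if m < A then solve (A + m) t
    else if 1 < A then min (solve A ((A - 1) :: m :: t)) (solve A t) + 1
    else solve A t + 1
termination_by (phiA A motes, epsA A motes, motes.length)
decreasing_by
  · exact measure_abs_dec (by assumption)
  · exact measure_add_dec (by assumption) (by assumption)
  · exact measure_del_dec (by assumption)
  · exact measure_del_dec (by assumption)

-- ===== PORT B =====
-- _upd(d, k, v): keep the smaller cost for key k
def updMin (nxt : PySem.Dict Int Int) (k v : Int) : PySem.Dict Int Int :=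
  match nxt.get? k with
  | none => nxt.insert k v
  | some w => nxt.insert k (min w v)

-- the inner while loop of Source B (2 ≤ a is the loop's invariant, re-checked for totality)
def blockerLoop (m a c d : Int) (nxt : PySem.Dict Int Int) : PySem.Dict Int Int :=
  if 2 ≤ a ∧ a ≤ m then blockerLoop m (2*a - 1) c (d + 1) (updMin nxt a (c + d))
  else updMin nxt (a + m) (c + d - 1)
termination_by (m + 1 - a).toNat
decreasing_by omega

-- body of "for x, c in frontier.items()"
def stepPair (m : Int) (nxt : PySem.Dict Int Int) (p : Int × Int) : PySem.Dict Int Int :=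
  if m < p.1 then updMin nxt (p.1 + m) p.2
  else if p.1 ≤ 1 then updMin nxt p.1 (p.2 + 1)
  else blockerLoop m p.1 p.2 1 nxt

-- one pass of the outer for-loop: rebuild the frontier for the next mote
def stepD (m : Int) (F : PySem.Dict Int Int) : PySem.Dict Int Int :=
  F.items.foldl (stepPair m) PySem.Dict.empty

def solve_alt (A : Int) (motes : List Int) : Int :=
  let F := motes.foldl (fun F m => stepD m F) ((PySem.Dict.empty).insert A 0)
  match PySem.List.min? F.values (fun x => x) with
  | some v => v
  | none => 0  -- unreachable: the frontier is never empty

-- ===== PRECONDITION & SPEC =====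
def Spec_solve (A : Int) (motes : List Int) (out : Int) : Prop := out = solve_alt A motes
instance (A : Int) (motes : List Int) (out : Int) : Decidable (Spec_solve A motes out) := by unfold Spec_solve; infer_instance

-- ===== CLAIM (what is proved, stated in full; the proofs are below) =====
def Claim_equal_solve : Prop := ∀ (A : Int) (motes : List Int), Dom_solve A motes → Spec_solve A motes (solve A motes)

-- ===== LEMMAS AND PROOFS =====

-- unfolding equations for solve
theorem solve_nil (A : Int) : solve A [] = 0 := by rw [solve]

theorem solve_absorb {A m : Int} (t : List Int) (h : m < A) :
    solve A (m :: t) = solve (A + m) t := by rw [solve]; simp [h]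

theorem solve_add {A m : Int} (t : List Int) (h1 : ¬ m < A) (h2 : 1 < A) :
    solve A (m :: t) = min (solve A ((A - 1) :: m :: t)) (solve A t) + 1 := by
  rw [solve]; simp [h1, h2]

theorem solve_del {A m : Int} (t : List Int) (h1 : ¬ m < A) (h2 : ¬ 1 < A) :
    solve A (m :: t) = solve A t + 1 := by rw [solve]; simp [h1, h2]

-- optional min over Option Int
def omin : Option Int → Option Int → Option Int
  | none, o => o
  | some a, none => some a
  | some a, some b => some (min a b)

theorem omin_none_right (o : Option Int) : omin o none = o := by cases o <;> rfl

theorem omin_assoc (a b c : Option Int) : omin (omin a b) c = omin a (omin b c) := by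
  cases a <;> cases b <;> cases c <;> simp [omin, min_assoc]

theorem omin_comm (a b : Option Int) : omin a b = omin b a := by
  cases a <;> cases b <;> simp [omin, min_comm]

-- min over a pair list of (cost + completion cost of size from the rest list l)
def mv (l : List Int) (items : List (Int × Int)) : Option Int :=
  items.foldr (fun p o => omin (some (p.2 + solve p.1 l)) o) none

def M (l : List Int) (F : PySem.Dict Int Int) : Option Int := mv l F.items

theorem mv_cons (l : List Int) (p : Int × Int) (ps : List (Int × Int)) :
    mv l (p :: ps) = omin (some (p.2 + solve p.1 l)) (mv l ps) := rfl

theorem updMin_nodup {nxt : PySem.Dict Int Int} (h : nxt.keys.Nodup) (k v : Int) :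
    (updMin nxt k v).keys.Nodup := by
  unfold updMin; split <;> exact PySem.Dict.nodup_keys_insert _ _ _ h

theorem omin_some_some (a b : Int) : omin (some a) (some b) = some (min a b) := rfl

theorem mv_append (l : List Int) (ps : List (Int × Int)) (p : Int × Int) :
    mv l (ps ++ [p]) = omin (mv l ps) (some (p.2 + solve p.1 l)) := by
  induction ps with
  | nil => simp [mv, omin]
  | cons q ps ih =>
    rw [List.cons_append, mv_cons, ih, mv_cons, omin_assoc]

theorem mv_replace (l : List Int) (k w v : Int) :
    ∀ (items : List (Int × Int)), (items.map (·.1)).Nodup → (k, w) ∈ items →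
    mv l (items.map (fun p => if p.1 == k then (k, min w v) else p)) =
      omin (mv l items) (some (v + solve k l)) := by
  intro items
  induction items with
  | nil => intro _ hm; simp at hm
  | cons p ps ih =>
    intro hnd hm
    simp only [List.map_cons, List.nodup_cons, List.mem_map] at hnd
    by_cases hk : p.1 = k
    · -- head is the key; tail untouched
      have hpw : p = (k, w) := by
        rcases List.mem_cons.mp hm with h | h
        · exact h.symm
        · exact (hnd.1 ⟨(k, w), h, hk.symm⟩).elim
      have htail : ps.map (fun q => if q.1 == k then (k, min w v) else q) = ps := by
        apply List.map_congr_left ?_ |>.trans (List.map_id _)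
        intro q hq
        have : q.1 ≠ k := by
          intro hq1; exact hnd.1 ⟨q, hq, by rw [hq1, hk]⟩
        simp [this]
      rw [List.map_cons, htail]
      subst hpw
      simp only [beq_self_eq_true, if_pos]
      rw [mv_cons, mv_cons]
      have : min w v + solve k l = min (w + solve k l) (v + solve k l) := by
        rw [Int.min_add_right]
      rw [this, ← omin_some_some, omin_assoc, omin_assoc]
      congr 1
      rw [omin_comm]
    · have hm' : (k, w) ∈ ps := by
        rcases List.mem_cons.mp hm with h | h
        · exact absurd (by rw [← h]) hk
        · exact h
      rw [List.map_cons, if_neg (by simp [hk]), mv_cons, mv_cons,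
        ih hnd.2 hm']
      rw [← omin_assoc (some (p.2 + solve p.1 l)) (mv l ps) (some (v + solve k l))]

theorem M_updMin {nxt : PySem.Dict Int Int} (hnd : nxt.keys.Nodup) (l : List Int) (k v : Int) :
    M l (updMin nxt k v) = omin (M l nxt) (some (v + solve k l)) := by
  unfold updMin
  cases h : nxt.get? k with
  | none =>
    have hc : nxt.contains k = false := by
      rw [PySem.Dict.contains_eq_isSome_get?, h]; rfl
    unfold M
    rw [PySem.Dict.items_insert_of_not_contains _ _ hc, mv_append]
  | some w =>
    have hc : nxt.contains k = true := by
      rw [PySem.Dict.contains_eq_isSome_get?, h]; rfl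
    have hmem : (k, w) ∈ nxt.items := PySem.Dict.mem_items_of_get?_eq_some _ h
    unfold M
    rw [PySem.Dict.items_insert_of_contains _ _ hc]
    exact mv_replace l k w v nxt.items (by simpa [PySem.Dict.keys] using hnd) hmem

theorem blockerLoop_nodup (m c : Int) :
    ∀ (a d : Int) (nxt : PySem.Dict Int Int), nxt.keys.Nodup →
      (blockerLoop m a c d nxt).keys.Nodup := by
  refine blockerLoop.induct m c
    (motive := fun a d nxt => nxt.keys.Nodup → (blockerLoop m a c d nxt).keys.Nodup) ?_ ?_
  · intro a d nxt hg ih h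
    rw [blockerLoop, if_pos hg]
    exact ih (updMin_nodup h _ _)
  · intro a d nxt hg h
    rw [blockerLoop, if_neg hg]
    exact updMin_nodup h _ _

theorem M_blockerLoop (l : List Int) (m c : Int) :
    ∀ (a d : Int) (nxt : PySem.Dict Int Int), nxt.keys.Nodup → 2 ≤ a →
    M l (blockerLoop m a c d nxt) = omin (M l nxt) (some (c + d - 1 + solve a (m :: l))) := by
  refine blockerLoop.induct m c
    (motive := fun a d nxt => nxt.keys.Nodup → 2 ≤ a →
      M l (blockerLoop m a c d nxt) = omin (M l nxt) (some (c + d - 1 + solve a (m :: l)))) ?_ ?_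
  · intro a d nxt hg ih hnd ha
    obtain ⟨ha2, ham⟩ := hg
    rw [blockerLoop, if_pos ⟨ha2, ham⟩]
    rw [ih (updMin_nodup hnd _ _) (by omega), M_updMin hnd]
    have hstep : solve a ((a - 1) :: m :: l) = solve (2*a - 1) (m :: l) := by
      rw [solve_absorb _ (by omega : a - 1 < a)]
      ring_nf
    have hblk : solve a (m :: l) = min (solve a ((a - 1) :: m :: l)) (solve a l) + 1 :=
      solve_add l (by omega) (by omega)
    rw [omin_assoc, omin_some_some]
    congr 2
    rw [hblk, hstep]
    rw [show c + d - 1 + (min (solve (2*a - 1) (m :: l)) (solve a l) + 1)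
        = min (solve (2*a - 1) (m :: l)) (solve a l) + (c + d) by ring]
    rw [← Int.min_add_right, min_comm]
    congr 1 <;> ring
  · intro a d nxt hg hnd ha
    rw [blockerLoop, if_neg hg, M_updMin hnd]
    have hm : m < a := by
      by_contra hm'
      exact hg ⟨ha, by omega⟩
    rw [solve_absorb l hm]

theorem M_stepPair {nxt : PySem.Dict Int Int} (hnd : nxt.keys.Nodup) (l : List Int)
    (m : Int) (p : Int × Int) :
    M l (stepPair m nxt p) = omin (M l nxt) (some (p.2 + solve p.1 (m :: l))) := by
  unfold stepPair
  by_cases h1 : m < p.1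
  · rw [if_pos h1, M_updMin hnd, solve_absorb l h1]
  · rw [if_neg h1]
    by_cases h2 : p.1 ≤ 1
    · rw [if_pos h2, M_updMin hnd, solve_del l h1 (by omega)]
      congr 2
      ring
    · rw [if_neg h2, M_blockerLoop l m p.2 p.1 1 nxt hnd (by omega)]
      congr 2
      ring

theorem stepPair_nodup {nxt : PySem.Dict Int Int} (h : nxt.keys.Nodup) (m : Int) (p : Int × Int) :
    (stepPair m nxt p).keys.Nodup := by
  unfold stepPair
  split
  · exact updMin_nodup h _ _
  · split
    · exact updMin_nodup h _ _
    · exact blockerLoop_nodup _ _ _ _ _ h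

theorem M_foldl_stepPair {nxt : PySem.Dict Int Int} (hnd : nxt.keys.Nodup) (l : List Int)
    (m : Int) (ps : List (Int × Int)) :
    M l (ps.foldl (stepPair m) nxt) = omin (M l nxt) (mv (m :: l) ps) := by
  induction ps generalizing nxt with
  | nil =>
    rw [List.foldl_nil, show mv (m :: l) [] = none from rfl, omin_none_right]
  | cons p ps ih =>
    rw [List.foldl_cons, ih (stepPair_nodup hnd m p), M_stepPair hnd, mv_cons,
      omin_assoc]

theorem empty_keys_nodup : (PySem.Dict.empty : PySem.Dict Int Int).keys.Nodup :=
  PySem.Dict.nodup_keys_empty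

theorem M_stepD (F : PySem.Dict Int Int) (l : List Int) (m : Int) :
    M l (stepD m F) = M (m :: l) F := by
  unfold stepD
  rw [M_foldl_stepPair empty_keys_nodup l m F.items]
  have : M l (PySem.Dict.empty : PySem.Dict Int Int) = none := rfl
  rw [this]
  rfl

theorem M_fold_motes (F : PySem.Dict Int Int) (motes : List Int) :
    M [] (motes.foldl (fun F m => stepD m F) F) = M motes F := by
  induction motes generalizing F with
  | nil => rfl
  | cons m t ih => rw [List.foldl_cons, ih (stepD m F), M_stepD F]

theorem foldl_min_comm (t : List Int) : ∀ x y : Int, min x (t.foldl min y) = t.foldl min (min x y) := by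
  induction t with
  | nil => intro x y; rfl
  | cons z t ih =>
    intro x y
    simp only [List.foldl_cons]
    rw [ih, min_assoc]

theorem foldr_omin_cons (x : Int) (t : List Int) :
    (x :: t).foldr (fun y o => omin (some y) o) none = some (t.foldl min x) := by
  induction t generalizing x with
  | nil => rfl
  | cons y t ih =>
    rw [List.foldr_cons, ih y, omin_some_some, foldl_min_comm, List.foldl_cons]

theorem mv_nil_eq (items : List (Int × Int)) :
    mv [] items = (items.map (·.2)).foldr (fun x o => omin (some x) o) none := by
  induction items with
  | nil => rfl
  | cons p ps ih =>
    rw [mv_cons, ih, List.map_cons, List.foldr_cons]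
    congr 1
    rw [solve_nil, add_zero]

-- ===== VERDICT (by name: the statement is the Claim_ definition above) =====
theorem solve_spec : Claim_equal_solve := by
  intro A motes _
  unfold Spec_solve solve_alt
  have hM : mv [] (motes.foldl (fun F m => stepD m F)
      ((PySem.Dict.empty : PySem.Dict Int Int).insert A 0)).items = some (solve A motes) := by
    show M [] _ = _
    rw [M_fold_motes]
    unfold M
    rw [PySem.Dict.items_insert_of_not_contains _ _ (PySem.Dict.contains_empty A)]
    show mv motes ([] ++ [(A, 0)]) = _
    simp [mv, omin]
  rw [mv_nil_eq] at hM
  cases hvs : (motes.foldl (fun F m => stepD m F)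
      ((PySem.Dict.empty : PySem.Dict Int Int).insert A 0)).items.map (·.2) with
  | nil => rw [hvs] at hM; exact absurd hM (by simp)
  | cons x t =>
    rw [hvs, foldr_omin_cons] at hM
    have hvals : (motes.foldl (fun F m => stepD m F)
        ((PySem.Dict.empty : PySem.Dict Int Int).insert A 0)).values = x :: t := by
      rw [show ∀ d : PySem.Dict Int Int, d.values = d.items.map (·.2) from fun _ => rfl, hvs]
    simp only [hvals, PySem.List.min?_id_cons]
    injection hM with h
    exact h.symm
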